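-- pv_equiv track=rewrite | github.com/yushroom/Kinect2 | python/und_shift.py | shift_depth
-- ===== SOURCE A (Python) =====
-- def shift_depth(depth, offsetx, offsety, width, height):
--     depth_new = [0]*(width*height)
--     for i in range(width):
--         for j in range(height):
--             newi = i+offsetx
--             newj = j+offsety
--             if newi < 0 or newi >= width or newj <0 or newj >= height:
--                 continue
--             depth_new[newi+newj*width] = depth[i+j*width]
--     return depth_new
-- ===== SOURCE B (Python) =====
-- def shift_depth(depth, offsetx, offsety, width, height):
--     depth_new = [0] * (width * height)
--     i0 = max(0, -offsetx)
--     i1 = min(width, width - offsetx)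
--     j0 = max(0, -offsety)
--     j1 = min(height, height - offsety)
--     if i0 < i1:
--         n = i1 - i0
--         for j in range(j0, j1):
--             src = i0 + j * width
--             dst = (i0 + offsetx) + (j + offsety) * width
--             depth_new[dst:dst + n] = depth[src:src + n]
--     return depth_new
-- ===== Notes on version B (the rewrite author's own statement) =====
-- stated objective: simpler
-- what changed: Replaces the per-pixel double loop with per-destination bounds checks by computing the overlapping source column/row ranges once and copying one contiguous slice per row.
import Mathlib
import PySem

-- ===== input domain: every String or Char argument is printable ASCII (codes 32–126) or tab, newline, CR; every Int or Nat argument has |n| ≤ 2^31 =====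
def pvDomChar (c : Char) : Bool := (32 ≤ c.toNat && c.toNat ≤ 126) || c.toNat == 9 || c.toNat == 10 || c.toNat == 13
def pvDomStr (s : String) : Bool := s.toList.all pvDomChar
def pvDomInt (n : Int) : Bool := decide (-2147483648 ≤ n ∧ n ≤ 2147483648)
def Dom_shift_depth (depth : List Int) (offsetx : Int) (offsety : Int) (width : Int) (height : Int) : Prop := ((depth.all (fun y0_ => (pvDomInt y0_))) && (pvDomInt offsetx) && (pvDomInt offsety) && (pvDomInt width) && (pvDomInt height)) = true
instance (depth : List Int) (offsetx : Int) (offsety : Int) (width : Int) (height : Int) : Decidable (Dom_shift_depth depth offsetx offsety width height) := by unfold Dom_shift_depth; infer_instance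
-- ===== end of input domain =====

-- B replaces A's per-destination-pixel double loop (bounds check + scalar store per pixel)
-- by computing the overlapping source column/row ranges once and copying one contiguous
-- slice per overlapping row (objective: simpler).

-- ===== PORT A =====
-- '[0]*(width*height)' is List.replicate (width*height).toNat 0 (a negative repeat count gives []).
-- 'depth_new[t] = v': the guard puts t in [0, width*height), so pySetD is exact here.
-- 'depth[i+j*width]' is read as pyGetD with default 0: exact on Pre_ (the read index is then
-- nonnegative and in range; outside Pre_ Python raises IndexError and nothing is claimed).
def shift_depth (depth : List Int) (offsetx : Int) (offsety : Int) (width : Int) (height : Int) : List Int :=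
  (PySem.List.pyRange 0 width 1).foldl (fun buf i =>
    (PySem.List.pyRange 0 height 1).foldl (fun buf j =>
      if i + offsetx < 0 ∨ i + offsetx ≥ width ∨ j + offsety < 0 ∨ j + offsety ≥ height then buf
      else PySem.List.pySetD buf ((i + offsetx) + (j + offsety) * width)
             (PySem.List.pyGetD depth (i + j * width) 0)) buf)
    (List.replicate (width * height).toNat 0)

-- ===== PORT B =====
-- Python slice assignment 'buf[dst:dst+n] = depth[src:src+n]' is ported as
-- take/slice/drop; exact here because in the taken branch 0 ≤ dst and 0 < n, so Python
-- replaces exactly the positions [dst, dst+n) (clamped the same way take/drop clamp).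
-- (Source B's local names i0, i1, j0, j1, n, src, dst are inlined.)
def shift_depth_alt (depth : List Int) (offsetx : Int) (offsety : Int) (width : Int) (height : Int) : List Int :=
  if max 0 (-offsetx) < min width (width - offsetx) then
    (PySem.List.pyRange (max 0 (-offsety)) (min height (height - offsety)) 1).foldl (fun buf j =>
      buf.take ((max 0 (-offsetx) + offsetx) + (j + offsety) * width).toNat
      ++ PySem.List.slice depth (some (max 0 (-offsetx) + j * width))
           (some ((max 0 (-offsetx) + j * width) + (min width (width - offsetx) - max 0 (-offsetx))))
      ++ buf.drop (((max 0 (-offsetx) + offsetx) + (j + offsety) * width)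
           + (min width (width - offsetx) - max 0 (-offsetx))).toNat)
      (List.replicate (width * height).toNat 0)
  else List.replicate (width * height).toNat 0

-- ===== PRECONDITION & SPEC =====
-- Pre_ excludes exactly the inputs on which A raises IndexError reading depth[i+j*width]:
-- when the source/destination overlap is nonempty, the largest read source index must be < len(depth).
def Pre_shift_depth (depth : List Int) (offsetx : Int) (offsety : Int) (width : Int) (height : Int) : Prop :=
  max 0 (-offsetx) < min width (width - offsetx) →
  max 0 (-offsety) < min height (height - offsety) →
  (min width (width - offsetx) - 1) + (min height (height - offsety) - 1) * width < (depth.length : Int)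
instance (depth : List Int) (offsetx : Int) (offsety : Int) (width : Int) (height : Int) : Decidable (Pre_shift_depth depth offsetx offsety width height) := by unfold Pre_shift_depth; infer_instance

def pvWitness_shift_depth : List Int × Int × Int × Int × Int := ([1, 2, 3, 4], 1, 0, 2, 2)

def Spec_shift_depth (depth : List Int) (offsetx : Int) (offsety : Int) (width : Int) (height : Int) (out : List Int) : Prop := out = shift_depth_alt depth offsetx offsety width height
instance (depth : List Int) (offsetx : Int) (offsety : Int) (width : Int) (height : Int) (out : List Int) : Decidable (Spec_shift_depth depth offsetx offsety width height out) := by unfold Spec_shift_depth; infer_instance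

-- ===== CLAIM (what is proved, stated in full; the proofs are below) =====
def Claim_equal_shift_depth : Prop := ∀ (depth : List Int) (offsetx : Int) (offsety : Int) (width : Int) (height : Int), Dom_shift_depth depth offsetx offsety width height → Pre_shift_depth depth offsetx offsety width height → Spec_shift_depth depth offsetx offsety width height (shift_depth depth offsetx offsety width height)

-- ===== LEMMAS AND PROOFS =====

-- the unique source pixel whose destination is flat index k (valid when 0 < w, 0 ≤ k < w*h)
def pvHitI (ox w k : Int) : Int := k % w - ox
def pvHitJ (oy w k : Int) : Int := k / w - oy

-- the common per-index specification both ports are shown to compute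
def pvPix (depth : List Int) (ox oy w h k : Int) : Int :=
  if 0 ≤ pvHitI ox w k ∧ pvHitI ox w k < w ∧ 0 ≤ pvHitJ oy w k ∧ pvHitJ oy w k < h
  then depth.getD (pvHitI ox w k + pvHitJ oy w k * w).toNat 0 else 0

-- simulation: a fold over buffers that preserves length N and acts on slot k like G
lemma pv_foldl_sim {α : Type} (L : List α) (F : List Int → α → List Int) (G : Int → α → Int)
    (k N : Nat)
    (hF : ∀ buf a, a ∈ L → buf.length = N →
      (F buf a).length = N ∧ (F buf a).getD k 0 = G (buf.getD k 0) a) :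
    ∀ buf, buf.length = N →
      (L.foldl F buf).length = N ∧ (L.foldl F buf).getD k 0 = L.foldl G (buf.getD k 0) := by
  induction L with
  | nil => intro buf h; exact ⟨h, rfl⟩
  | cons a L ih =>
    intro buf h
    obtain ⟨h1, h2⟩ := hF buf a (by simp) h
    obtain ⟨h3, h4⟩ := ih (fun buf a ha h => hF buf a (List.mem_cons_of_mem _ ha) h) (F buf a) h1
    rw [h2] at h4
    exact ⟨h3, h4⟩

lemma pv_vfold_no_hit {α : Type} (L : List α) (P : α → Prop) [DecidablePred P] (v : α → Int)
    (h : ∀ a ∈ L, ¬ P a) :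
    ∀ c, L.foldl (fun c a => if P a then v a else c) c = c := by
  induction L with
  | nil => intro c; rfl
  | cons a L ih =>
    intro c
    simp only [List.foldl_cons, if_neg (h a (by simp))]
    exact ih (fun x hx => h x (List.mem_cons_of_mem _ hx)) c

lemma pv_vfold_eq_hit (L : List Int) (a₀ : Int) (v : Int → Int)
    (hnd : L.Nodup) (h0 : a₀ ∈ L) :
    ∀ c, L.foldl (fun c a => if a = a₀ then v a else c) c = v a₀ := by
  induction L with
  | nil => simp at h0
  | cons b L ih =>
    intro c
    simp only [List.foldl_cons]
    by_cases hb : b = a₀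
    · rw [if_pos hb, hb]
      exact pv_vfold_no_hit L (fun x => x = a₀) v
        (fun x hx hxa => (List.nodup_cons.1 hnd).1 (hb ▸ hxa ▸ hx)) (v a₀)
    · rw [if_neg hb]
      exact ih (List.nodup_cons.1 hnd).2
        (by cases List.mem_cons.1 h0 with
            | inl h => exact absurd h.symm hb
            | inr h => exact h) c

-- div/mod facts for a flat index k of a w×h image
lemma pv_divmod_facts (w h k : Int) (hw : 0 < w) (hk0 : 0 ≤ k) (hk : k < w * h) :
    0 ≤ k % w ∧ k % w < w ∧ 0 ≤ k / w ∧ k / w < h ∧ k % w + (k / w) * w = k := by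
  refine ⟨Int.emod_nonneg k (by omega), Int.emod_lt_of_pos k hw,
    Int.ediv_nonneg hk0 (by omega), Int.ediv_lt_of_lt_mul hw (by linarith [mul_comm w h]), ?_⟩
  have h1 := Int.emod_add_mul_ediv k w
  nlinarith [h1]

-- uniqueness: if r + q*w = k with 0 ≤ r < w then q = k/w and r = k%w
lemma pv_divmod_unique (w q r k : Int) (hw : 0 < w) (h0 : 0 ≤ r) (hrw : r < w)
    (he : r + q * w = k) : k / w = q ∧ k % w = r := by
  rw [Int.ediv_emod_unique (by omega)]
  refine ⟨by nlinarith, by omega⟩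

-- getD of a set, on a buffer slot
lemma pv_getD_set (l : List Int) (i : Nat) (v : Int) (k : Nat) :
    (l.set i v).getD k 0 = if k = i ∧ i < l.length then v else l.getD k 0 := by
  simp only [List.getD_eq_getElem?_getD, List.getElem?_set]
  split_ifs with h1 h2 h3 h4 h5 <;> simp_all

-- getD of a splice buf[d:d+m] := seg
lemma pv_splice_getD (buf seg : List Int) (d m k : Nat)
    (hdm : d + m ≤ buf.length) (hseg : seg.length = m) :
    (buf.take d ++ seg ++ buf.drop (d + m)).getD k 0 =
      if d ≤ k ∧ k < d + m then seg.getD (k - d) 0 else buf.getD k 0 := by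
  simp only [List.getD_eq_getElem?_getD, List.getElem?_append, List.length_append,
    List.length_take, List.getElem?_take, List.getElem?_drop, hseg]
  have hd : min d buf.length = d := by omega
  split_ifs <;> simp_all <;> first
    | rfl
    | omega
    | (congr 1; omega)

lemma pv_splice_length (buf seg : List Int) (d m : Nat)
    (hdm : d + m ≤ buf.length) (hseg : seg.length = m) :
    (buf.take d ++ seg ++ buf.drop (d + m)).length = buf.length := by
  simp [hseg, List.length_take, List.length_drop]
  omega

-- getD of a take-of-drop window
lemma pv_window_getD (depth : List Int) (a t m : Nat) (hm : m < t) :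
    (((depth.drop a).take t).getD m 0) = depth.getD (a + m) 0 := by
  simp only [List.getD_eq_getElem?_getD, List.getElem?_take, List.getElem?_drop]
  rw [if_pos hm]

-- characterization of port A: length, and per-slot value = pvPix
lemma pv_A_char (depth : List Int) (ox oy w h : Int) (hw : 0 < w) :
    (shift_depth depth ox oy w h).length = (w * h).toNat ∧
    ∀ k : Nat, k < (w * h).toNat →
      (shift_depth depth ox oy w h).getD k 0 = pvPix depth ox oy w h (k : Int) := by
  have main : ∀ k : Nat,
      (shift_depth depth ox oy w h).length = (w * h).toNat ∧
      (k < (w * h).toNat →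
        (shift_depth depth ox oy w h).getD k 0 = pvPix depth ox oy w h (k : Int)) := by
    intro k
    -- simulate the buffer folds on slot k
    have hsim := pv_foldl_sim (PySem.List.pyRange 0 w 1)
      (fun buf i => (PySem.List.pyRange 0 h 1).foldl (fun buf j =>
        if i + ox < 0 ∨ i + ox ≥ w ∨ j + oy < 0 ∨ j + oy ≥ h then buf
        else PySem.List.pySetD buf ((i + ox) + (j + oy) * w)
               (PySem.List.pyGetD depth (i + j * w) 0)) buf)
      (fun c i => (PySem.List.pyRange 0 h 1).foldl (fun c j =>
        if 0 ≤ i + ox ∧ i + ox < w ∧ 0 ≤ j + oy ∧ j + oy < h ∧ (i + ox) + (j + oy) * w = (k : Int)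
        then PySem.List.pyGetD depth (i + j * w) 0 else c) c)
      k ((w * h).toNat)
      (by
        intro buf i _ hbuf
        exact pv_foldl_sim (PySem.List.pyRange 0 h 1) _ _ k ((w * h).toNat)
          (by
            intro buf j _ hbuf
            by_cases hbad : i + ox < 0 ∨ i + ox ≥ w ∨ j + oy < 0 ∨ j + oy ≥ h
            · rw [if_pos hbad, if_neg (by omega)]
              exact ⟨hbuf, rfl⟩
            · rw [if_neg hbad]
              have hjw : 0 ≤ (j + oy) * w := mul_nonneg (by omega) (by omega)
              have hjw2 : (j + oy) * w ≤ (h - 1) * w :=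
                mul_le_mul_of_nonneg_right (by omega) (by omega)
              have ht0 : 0 ≤ (i + ox) + (j + oy) * w := by omega
              have hc1 : (h - 1) * w = h * w - w := by ring
              have hc2 : h * w = w * h := mul_comm h w
              have htlt : (i + ox) + (j + oy) * w < w * h := by omega
              rw [PySem.List.pySetD_of_nonneg _ _ ht0]
              refine ⟨by simpa using hbuf, ?_⟩
              rw [pv_getD_set]
              have hlen : ((i + ox) + (j + oy) * w).toNat < buf.length := by
                rw [hbuf]; omega
              split_ifs with h1 h2 <;> first | rfl | omega)
          buf hbuf)
      (List.replicate (w * h).toNat 0) (by simp)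
    unfold shift_depth
    refine ⟨hsim.1, ?_⟩
    intro hk
    rw [hsim.2]
    rw [List.getD_replicate (x := (0:Int)) (y := 0) (i := k) (n := (w*h).toNat) (by omega)]
    -- evaluate the value fold
    have hk0 : (0 : Int) ≤ (k : Int) := by omega
    have hkN : (k : Int) < w * h := by omega
    obtain ⟨e1, e2, e3, e4, e5⟩ := pv_divmod_facts w h k hw hk0 hkN
    obtain ⟨R, hR⟩ : ∃ r : Int, r = (k : Int) % w := ⟨_, rfl⟩
    obtain ⟨Q, hQ⟩ : ∃ q : Int, q = (k : Int) / w := ⟨_, rfl⟩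
    rw [← hR] at e1 e2
    rw [← hQ] at e3 e4
    rw [← hR, ← hQ] at e5
    obtain ⟨I, hIdef⟩ : ∃ I : Int, I = R - ox := ⟨_, rfl⟩
    obtain ⟨J, hJdef⟩ : ∃ J : Int, J = Q - oy := ⟨_, rfl⟩
    have hprod : ∀ j : Int, j = J → (j + oy) * w = Q * w := by
      intro j hj; subst hj; rw [hJdef]; ring
    have hit_iff : ∀ i j : Int, 0 ≤ i → i < w → 0 ≤ j → j < h →
        ((0 ≤ i + ox ∧ i + ox < w ∧ 0 ≤ j + oy ∧ j + oy < h ∧ (i + ox) + (j + oy) * w = (k : Int))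
          ↔ (i = I ∧ j = J ∧ 0 ≤ I ∧ I < w ∧ 0 ≤ J ∧ J < h)) := by
      intro i j hi1 hi2 hj1 hj2
      constructor
      · rintro ⟨a1, a2, a3, a4, a5⟩
        obtain ⟨u1, u2⟩ := pv_divmod_unique w (j + oy) (i + ox) (k : Int) hw a1 a2 a5
        rw [← hQ] at u1
        rw [← hR] at u2
        omega
      · rintro ⟨b1, b2, b3, b4, b5, b6⟩
        have hp := hprod j b2
        omega
    by_cases hsrc : 0 ≤ I ∧ I < w ∧ 0 ≤ J ∧ J < h
    · -- unique hit at (I, J)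
      have hval : ∀ (c : Int), ∀ i ∈ PySem.List.pyRange 0 w 1,
          List.foldl (fun c j =>
            if 0 ≤ i + ox ∧ i + ox < w ∧ 0 ≤ j + oy ∧ j + oy < h ∧ (i + ox) + (j + oy) * w = (k : Int)
            then PySem.List.pyGetD depth (i + j * w) 0 else c) c (PySem.List.pyRange 0 h 1)
          = if i = I then PySem.List.pyGetD depth (I + J * w) 0 else c := by
        intro c i hmi
        have hib := PySem.List.mem_pyRange_one.1 hmi
        by_cases hiI : i = I
        · subst hiI
          rw [if_pos rfl]
          have hcongr : ∀ (c : Int), ∀ j ∈ PySem.List.pyRange 0 h 1,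
              (if 0 ≤ i + ox ∧ i + ox < w ∧ 0 ≤ j + oy ∧ j + oy < h ∧ (i + ox) + (j + oy) * w = (k : Int)
               then PySem.List.pyGetD depth (i + j * w) 0 else c)
              = if j = J then PySem.List.pyGetD depth (i + j * w) 0 else c := by
            intro c j hmj
            have hjb := PySem.List.mem_pyRange_one.1 hmj
            by_cases hj : j = J
            · rw [if_pos ((hit_iff i j hib.1 hib.2 hjb.1 hjb.2).2 ⟨rfl, hj, hsrc⟩), if_pos hj]
            · rw [if_neg (fun hc => hj ((hit_iff i j hib.1 hib.2 hjb.1 hjb.2).1 hc).2.1), if_neg hj]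
          rw [PySem.List.foldl_congr_mem _ _
            (fun c j => if j = J then PySem.List.pyGetD depth (i + j * w) 0 else c) _ hcongr]
          rw [pv_vfold_eq_hit _ J _ (PySem.List.nodup_pyRange_one 0 h)
            (PySem.List.mem_pyRange_one.2 ⟨hsrc.2.2.1, hsrc.2.2.2⟩)]
        · rw [if_neg hiI]
          exact pv_vfold_no_hit _ _ _
            (fun j hmj hc => hiI ((hit_iff i j hib.1 hib.2
              (PySem.List.mem_pyRange_one.1 hmj).1 (PySem.List.mem_pyRange_one.1 hmj).2).1 hc).1) c
      rw [PySem.List.foldl_congr_mem _ _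
        (fun c i => if i = I then PySem.List.pyGetD depth (I + J * w) 0 else c) _ hval]
      rw [pv_vfold_eq_hit _ I _ (PySem.List.nodup_pyRange_one 0 w)
        (PySem.List.mem_pyRange_one.2 ⟨hsrc.1, hsrc.2.1⟩)]
      have hIJ0 : 0 ≤ I + J * w := by
        have := mul_nonneg hsrc.2.2.1 (le_of_lt hw)
        omega
      rw [PySem.List.pyGetD_of_nonneg _ _ hIJ0]
      simp only [pvPix, pvHitI, pvHitJ]
      rw [← hR, ← hQ, ← hIdef, ← hJdef, if_pos hsrc]
    · -- no hit anywhere: the slot stays 0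
      have hval : ∀ (c : Int), ∀ i ∈ PySem.List.pyRange 0 w 1,
          List.foldl (fun c j =>
            if 0 ≤ i + ox ∧ i + ox < w ∧ 0 ≤ j + oy ∧ j + oy < h ∧ (i + ox) + (j + oy) * w = (k : Int)
            then PySem.List.pyGetD depth (i + j * w) 0 else c) c (PySem.List.pyRange 0 h 1)
          = c := by
        intro c i hmi
        have hib := PySem.List.mem_pyRange_one.1 hmi
        exact pv_vfold_no_hit _ _ _
          (fun j hmj hc => hsrc ((hit_iff i j hib.1 hib.2
            (PySem.List.mem_pyRange_one.1 hmj).1 (PySem.List.mem_pyRange_one.1 hmj).2).1 hc).2.2) c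
      rw [PySem.List.foldl_congr_mem _ _ (fun c _ => c) _ hval]
      rw [PySem.List.foldl_ignore]
      simp only [pvPix, pvHitI, pvHitJ]
      rw [← hR, ← hQ, ← hIdef, ← hJdef, if_neg hsrc]
  exact ⟨(main 0).1, fun k hk => (main k).2 hk⟩

-- characterization of port B under Pre_
lemma pv_B_char (depth : List Int) (ox oy w h : Int) (hw : 0 < w)
    (hpre : Pre_shift_depth depth ox oy w h) :
    (shift_depth_alt depth ox oy w h).length = (w * h).toNat ∧
    ∀ k : Nat, k < (w * h).toNat →
      (shift_depth_alt depth ox oy w h).getD k 0 = pvPix depth ox oy w h (k : Int) := by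
  have main : ∀ k : Nat,
      (shift_depth_alt depth ox oy w h).length = (w * h).toNat ∧
      (k < (w * h).toNat →
        (shift_depth_alt depth ox oy w h).getD k 0 = pvPix depth ox oy w h (k : Int)) := by
    intro k
    unfold shift_depth_alt
    obtain ⟨M0, hM0⟩ : ∃ m : Int, m = max 0 (-ox) := ⟨_, rfl⟩
    obtain ⟨M1, hM1⟩ : ∃ m : Int, m = min w (w - ox) := ⟨_, rfl⟩
    obtain ⟨N0, hN0⟩ : ∃ m : Int, m = max 0 (-oy) := ⟨_, rfl⟩
    obtain ⟨N1, hN1⟩ : ∃ m : Int, m = min h (h - oy) := ⟨_, rfl⟩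
    have hM0f : 0 ≤ M0 ∧ -ox ≤ M0 ∧ (M0 = 0 ∨ M0 = -ox) := by
      rw [hM0]; exact ⟨le_max_left _ _, le_max_right _ _, max_choice _ _⟩
    have hM1f : M1 ≤ w ∧ M1 ≤ w - ox ∧ (M1 = w ∨ M1 = w - ox) := by
      rw [hM1]; exact ⟨min_le_left _ _, min_le_right _ _, min_choice _ _⟩
    have hN0f : 0 ≤ N0 ∧ -oy ≤ N0 ∧ (N0 = 0 ∨ N0 = -oy) := by
      rw [hN0]; exact ⟨le_max_left _ _, le_max_right _ _, max_choice _ _⟩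
    have hN1f : N1 ≤ h ∧ N1 ≤ h - oy ∧ (N1 = h ∨ N1 = h - oy) := by
      rw [hN1]; exact ⟨min_le_left _ _, min_le_right _ _, min_choice _ _⟩
    have hpreM : M0 < M1 → N0 < N1 → (M1 - 1) + (N1 - 1) * w < (depth.length : Int) := by
      rw [hM0, hM1, hN0, hN1]; exact hpre
    rw [← hM0, ← hM1, ← hN0, ← hN1]
    by_cases hg : M0 < M1
    · rw [if_pos hg]
      have hsim := pv_foldl_sim (PySem.List.pyRange N0 N1 1)
        (fun buf j =>
          buf.take ((M0 + ox) + (j + oy) * w).toNat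
          ++ PySem.List.slice depth (some (M0 + j * w)) (some ((M0 + j * w) + (M1 - M0)))
          ++ buf.drop (((M0 + ox) + (j + oy) * w) + (M1 - M0)).toNat)
        (fun c j =>
          if ((M0 + ox) + (j + oy) * w ≤ (k : Int) ∧
              (k : Int) < ((M0 + ox) + (j + oy) * w) + (M1 - M0))
          then ((depth.drop (M0 + j * w).toNat).take ((M1 - M0).toNat)).getD
                 (k - ((M0 + ox) + (j + oy) * w).toNat) 0
          else c)
        k ((w * h).toNat)
        (by
          intro buf j hj hbuf
          beta_reduce
          have hjb := PySem.List.mem_pyRange_one.1 hj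
          have hjw : 0 ≤ (j + oy) * w := mul_nonneg (by omega) (by omega)
          have hjw2 : (j + oy) * w ≤ (h - 1) * w :=
            mul_le_mul_of_nonneg_right (by omega) (by omega)
          have hc1 : (h - 1) * w = h * w - w := by ring
          have hc2 : h * w = w * h := mul_comm h w
          have hd0 : 0 ≤ (M0 + ox) + (j + oy) * w := by omega
          have hdn : ((M0 + ox) + (j + oy) * w) + (M1 - M0) ≤ w * h := by omega
          have hjw3 : j * w ≤ (N1 - 1) * w :=
            mul_le_mul_of_nonneg_right (by omega) (by omega)
          have hjw4 : 0 ≤ j * w := mul_nonneg (by omega) (by omega)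
          have hsrc0 : 0 ≤ M0 + j * w := by omega
          have hlen := hpreM hg (by omega)
          have hc3 : (N1 - 1) * w = N1 * w - w := by ring
          have hc4 : j * w + w ≤ N1 * w := by omega
          have hsn : (M0 + j * w) + (M1 - M0) ≤ (depth.length : Int) := by omega
          rw [PySem.List.slice_toNat _ hsrc0 (by omega)]
          have hcnt : ((M0 + j * w) + (M1 - M0)).toNat - (M0 + j * w).toNat
              = (M1 - M0).toNat := by omega
          rw [hcnt]
          have hseg : (List.take ((M1 - M0).toNat)
              (List.drop (M0 + j * w).toNat depth)).length = (M1 - M0).toNat := by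
            simp only [List.length_take, List.length_drop]
            omega
          have hsplit : (((M0 + ox) + (j + oy) * w) + (M1 - M0)).toNat
              = ((M0 + ox) + (j + oy) * w).toNat + (M1 - M0).toNat := by omega
          rw [hsplit]
          have hdm : ((M0 + ox) + (j + oy) * w).toNat + (M1 - M0).toNat ≤ buf.length := by
            rw [hbuf]; omega
          constructor
          · rw [pv_splice_length _ _ _ _ hdm hseg, hbuf]
          · rw [pv_splice_getD _ _ _ _ _ hdm hseg]
            have hiff : (((M0 + ox) + (j + oy) * w).toNat ≤ k ∧
                k < ((M0 + ox) + (j + oy) * w).toNat + (M1 - M0).toNat)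
                ↔ ((M0 + ox) + (j + oy) * w ≤ (k : Int) ∧
                   (k : Int) < ((M0 + ox) + (j + oy) * w) + (M1 - M0)) := by omega
            split_ifs with h1 h2 h3
            · rfl
            · exact absurd (hiff.1 h1) h2
            · exact absurd (hiff.2 h3) h1
            · rfl)
        (List.replicate (w * h).toNat 0) (by simp)
      refine ⟨hsim.1, ?_⟩
      intro hk
      rw [hsim.2]
      rw [List.getD_replicate (x := (0:Int)) (y := 0) (i := k) (n := (w*h).toNat) (by omega)]
      have hk0 : (0 : Int) ≤ (k : Int) := by omega
      have hkN : (k : Int) < w * h := by omega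
      obtain ⟨e1, e2, e3, e4, e5⟩ := pv_divmod_facts w h k hw hk0 hkN
      obtain ⟨R, hR⟩ : ∃ r : Int, r = (k : Int) % w := ⟨_, rfl⟩
      obtain ⟨Q, hQ⟩ : ∃ q : Int, q = (k : Int) / w := ⟨_, rfl⟩
      rw [← hR] at e1 e2
      rw [← hQ] at e3 e4
      rw [← hR, ← hQ] at e5
      obtain ⟨I, hIdef⟩ : ∃ I : Int, I = R - ox := ⟨_, rfl⟩
      obtain ⟨J, hJdef⟩ : ∃ J : Int, J = Q - oy := ⟨_, rfl⟩
      have hit_iff : ∀ j : Int,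
          ((M0 + ox) + (j + oy) * w ≤ (k : Int) ∧
           (k : Int) < ((M0 + ox) + (j + oy) * w) + (M1 - M0))
          ↔ (j = J ∧ M0 ≤ I ∧ I < M1) := by
        intro j
        constructor
        · rintro ⟨a1, a2⟩
          obtain ⟨u1, u2⟩ := pv_divmod_unique w (j + oy) ((k : Int) - (j + oy) * w) (k : Int)
            hw (by omega) (by omega) (by ring)
          rw [← hQ] at u1
          rw [← hR] at u2
          omega
        · rintro ⟨b1, b2, b3⟩
          have hp : (j + oy) * w = Q * w := by
            subst b1; rw [hJdef]; ring
          omega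
      by_cases hx : M0 ≤ I ∧ I < M1 ∧ N0 ≤ J ∧ J < N1
      · -- the row containing slot k is copied
        have hval : ∀ (c : Int), ∀ j ∈ PySem.List.pyRange N0 N1 1,
            (if ((M0 + ox) + (j + oy) * w ≤ (k : Int) ∧
                (k : Int) < ((M0 + ox) + (j + oy) * w) + (M1 - M0))
             then ((depth.drop (M0 + j * w).toNat).take ((M1 - M0).toNat)).getD
                    (k - ((M0 + ox) + (j + oy) * w).toNat) 0
             else c)
            = if j = J then ((depth.drop (M0 + j * w).toNat).take ((M1 - M0).toNat)).getD
                    (k - ((M0 + ox) + (j + oy) * w).toNat) 0 else c := by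
          intro c j _
          by_cases hj : j = J
          · rw [if_pos ((hit_iff j).2 ⟨hj, hx.1, hx.2.1⟩), if_pos hj]
          · rw [if_neg (fun hc => hj ((hit_iff j).1 hc).1), if_neg hj]
        rw [PySem.List.foldl_congr_mem _ _
          (fun c j => if j = J then ((depth.drop (M0 + j * w).toNat).take ((M1 - M0).toNat)).getD
                    (k - ((M0 + ox) + (j + oy) * w).toNat) 0 else c) _
          (fun c j hj => hval c j hj)]
        rw [pv_vfold_eq_hit _ J _ (PySem.List.nodup_pyRange_one N0 N1)
          (PySem.List.mem_pyRange_one.2 ⟨hx.2.2.1, hx.2.2.2⟩)]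
        -- evaluate the copied value
        have hhit := (hit_iff J).2 ⟨rfl, hx.1, hx.2.1⟩
        have hp : (J + oy) * w = Q * w := by rw [hJdef]; ring
        have hJw : 0 ≤ J * w := mul_nonneg (by omega) (by omega)
        have hp2 : J * w = Q * w - oy * w := by rw [hJdef]; ring
        obtain ⟨A1, hA1⟩ : ∃ p : Int, p = (J + oy) * w := ⟨_, rfl⟩
        obtain ⟨A2, hA2⟩ : ∃ p : Int, p = J * w := ⟨_, rfl⟩
        obtain ⟨A3, hA3⟩ : ∃ p : Int, p = oy * w := ⟨_, rfl⟩
        obtain ⟨A4, hA4⟩ : ∃ p : Int, p = Q * w := ⟨_, rfl⟩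
        rw [← hA1] at hhit hp ⊢
        rw [← hA2] at hJw hp2 ⊢
        rw [← hA3] at hp2
        rw [← hA4] at hp hp2 e5
        have hQw : 0 ≤ A4 := by rw [hA4]; exact mul_nonneg e3 (by omega)
        have hD0 : 0 ≤ (M0 + ox) + A1 := by omega
        obtain ⟨dn, hdn⟩ : ∃ d : Nat, (d : Int) = (M0 + ox) + A1 :=
          ⟨((M0 + ox) + A1).toNat, Int.toNat_of_nonneg hD0⟩
        obtain ⟨mn, hmn⟩ : ∃ d : Nat, (d : Int) = M1 - M0 :=
          ⟨(M1 - M0).toNat, Int.toNat_of_nonneg (by omega)⟩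
        obtain ⟨an, han⟩ : ∃ d : Nat, (d : Int) = M0 + A2 :=
          ⟨(M0 + A2).toNat, Int.toNat_of_nonneg (by omega)⟩
        obtain ⟨bn, hbn⟩ : ∃ d : Nat, (d : Int) = I + A2 :=
          ⟨(I + A2).toNat, Int.toNat_of_nonneg (by omega)⟩
        rw [show ((M0 + ox) + A1).toNat = dn by rw [← hdn, Int.toNat_natCast],
            show (M1 - M0).toNat = mn by rw [← hmn, Int.toNat_natCast],
            show (M0 + A2).toNat = an by rw [← han, Int.toNat_natCast]]
        have hm : k - dn < mn := by omega
        rw [pv_window_getD _ _ _ _ hm]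
        have hidx : an + (k - dn) = bn := by omega
        rw [hidx]
        simp only [pvPix, pvHitI, pvHitJ]
        rw [← hR, ← hQ, ← hIdef, ← hJdef, ← hA2,
            show (I + A2).toNat = bn by rw [← hbn, Int.toNat_natCast],
            if_pos (by omega)]
      · -- no row writes slot k: it stays 0, and pvPix is 0
        have hval : ∀ (c : Int), ∀ j ∈ PySem.List.pyRange N0 N1 1,
            (if ((M0 + ox) + (j + oy) * w ≤ (k : Int) ∧
                (k : Int) < ((M0 + ox) + (j + oy) * w) + (M1 - M0))
             then ((depth.drop (M0 + j * w).toNat).take ((M1 - M0).toNat)).getD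
                    (k - ((M0 + ox) + (j + oy) * w).toNat) 0
             else c)
            = c := by
          intro c j hj
          have hjb := PySem.List.mem_pyRange_one.1 hj
          rw [if_neg]
          intro hc
          obtain ⟨u1, u2, u3⟩ := (hit_iff j).1 hc
          exact hx ⟨u2, u3, by omega, by omega⟩
        rw [PySem.List.foldl_congr_mem _ _ (fun c _ => c) _ (fun c j hj => hval c j hj)]
        rw [PySem.List.foldl_ignore]
        simp only [pvPix, pvHitI, pvHitJ]
        rw [← hR, ← hQ, ← hIdef, ← hJdef]
        rw [if_neg]
        intro hc
        exact hx ⟨by omega, by omega, by omega, by omega⟩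
    · rw [if_neg hg]
      refine ⟨by simp, ?_⟩
      intro hk
      rw [List.getD_replicate (x := (0:Int)) (y := 0) (i := k) (n := (w*h).toNat) (by omega)]
      have hk0 : (0 : Int) ≤ (k : Int) := by omega
      have hkN : (k : Int) < w * h := by omega
      obtain ⟨e1, e2, e3, e4, e5⟩ := pv_divmod_facts w h k hw hk0 hkN
      obtain ⟨R, hR⟩ : ∃ r : Int, r = (k : Int) % w := ⟨_, rfl⟩
      obtain ⟨Q, hQ⟩ : ∃ q : Int, q = (k : Int) / w := ⟨_, rfl⟩
      rw [← hR] at e1 e2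
      rw [← hQ] at e3 e4
      rw [← hR, ← hQ] at e5
      simp only [pvPix, pvHitI, pvHitJ]
      rw [← hR, ← hQ]
      rw [if_neg]
      intro hc
      omega
  exact ⟨(main 0).1, fun k hk => (main k).2 hk⟩

-- ===== VERDICT (by name: the statement is the Claim_ definition above) =====
theorem shift_depth_spec : Claim_equal_shift_depth := by
  intro depth ox oy w h _dom hpre
  unfold Spec_shift_depth
  by_cases hw : 0 < w
  · obtain ⟨la, va⟩ := pv_A_char depth ox oy w h hw
    obtain ⟨lb, vb⟩ := pv_B_char depth ox oy w h hw hpre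
    apply List.ext_getElem (by omega)
    intro k h1 h2
    have hk : k < (w * h).toNat := by omega
    have := (va k hk).trans (vb k hk).symm
    rwa [List.getD_eq_getElem _ _ h1, List.getD_eq_getElem _ _ h2] at this
  · -- w ≤ 0: A's outer range is empty and B's column overlap is empty; both return the all-zero buffer
    have hr : PySem.List.pyRange 0 w 1 = [] := by
      rw [PySem.List.pyRange_one, show ((w : Int) - 0).toNat = 0 by omega]
      rfl
    have hA : shift_depth depth ox oy w h = List.replicate (w * h).toNat 0 := by
      unfold shift_depth
      rw [hr]
      rfl
    have hB : shift_depth_alt depth ox oy w h = List.replicate (w * h).toNat 0 := by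
      unfold shift_depth_alt
      rw [if_neg (by omega)]
    rw [hA, hB]
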